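-- pv_equiv track=rewrite | github.com/henryhardigan/contact-alignment | mj_score.py | proline_run_ids
-- ===== SOURCE A (Python) =====
-- from typing import Dict, Iterable, List, Optional, Set, Tuple
--
-- def proline_run_ids(seq: str) -> List[int]:
--     """Return run IDs per position for proline runs (>=2), -1 otherwise."""
--     s = seq.strip().upper()
--     ids = [-1] * len(s)
--     i = 0
--     run_id = 0
--     while i < len(s):
--         if s[i] != "P":
--             i += 1
--             continue
--         j = i + 1
--         while j < len(s) and s[j] == "P":
--             j += 1
--         if j - i >= 2:
--             for k in range(i, j):
--                 ids[k] = run_id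
--             run_id += 1
--         i = j
--     return ids
-- ===== SOURCE B (Python) =====
-- def proline_run_ids(seq):
--     """Return run IDs per position for proline runs (>=2), -1 otherwise."""
--     s = seq.strip().upper()
--     # phase 1: run-length encode the whole string
--     groups = []  # [char, count]
--     for ch in s:
--         if groups and groups[-1][0] == ch:
--             groups[-1][1] += 1
--         else:
--             groups.append([ch, 1])
--     # phase 2: label each group
--     out = []
--     run_id = 0
--     for ch, n in groups:
--         if ch == "P" and n >= 2:
--             out.extend([run_id] * n)
--             run_id += 1
--         else:
--             out.extend([-1] * n)
--     return out
-- ===== Notes on version B (the rewrite author's own statement) =====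
-- stated objective: alternative
-- what changed: Replaces A's index-based nested while-loop scan that writes run IDs into a preallocated ids array with a two-phase pass: run-length encode the string into (char, count) groups, then emit labels group by group.
import Mathlib
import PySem

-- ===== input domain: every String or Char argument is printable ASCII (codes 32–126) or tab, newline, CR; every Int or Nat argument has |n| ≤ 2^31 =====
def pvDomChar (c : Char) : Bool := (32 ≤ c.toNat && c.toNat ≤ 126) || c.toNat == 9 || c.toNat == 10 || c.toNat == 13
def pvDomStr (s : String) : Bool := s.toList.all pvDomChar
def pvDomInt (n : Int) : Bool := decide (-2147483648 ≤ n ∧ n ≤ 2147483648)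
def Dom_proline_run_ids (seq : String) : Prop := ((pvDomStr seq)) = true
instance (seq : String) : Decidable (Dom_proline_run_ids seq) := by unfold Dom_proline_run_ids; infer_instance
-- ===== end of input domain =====

-- B replaces A's index-based nested while-scan over a preallocated ids array by a
-- two-phase pass: run-length encode the string, then label the groups (objective: alternative; same cost).

-- ===== PORT A =====
-- inner `while j < len(s) and s[j] == 'P': j += 1`
def pvAInner (s : List Char) (j : Nat) : Nat :=
  if h : j < s.length then
    if s[j] = 'P' then pvAInner s (j + 1) else j
  else j
termination_by s.length - j

theorem pvAInner_ge (s : List Char) (j : Nat) : j ≤ pvAInner s j := by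
  unfold pvAInner
  split
  · split
    · exact le_trans (Nat.le_succ j) (pvAInner_ge s (j + 1))
    · exact le_rfl
  · exact le_rfl
termination_by s.length - j

-- outer while loop of A, carrying the ids array, position i and run_id (j inlined)
def pvAOuter (s : List Char) (ids : List Int) (i : Nat) (runId : Int) : List Int :=
  if h : i < s.length then
    if s[i] ≠ 'P' then pvAOuter s ids (i + 1) runId
    else if pvAInner s (i + 1) - i ≥ 2 then
      pvAOuter s ((List.range' i (pvAInner s (i + 1) - i)).foldl (fun a k => a.set k runId) ids)
        (pvAInner s (i + 1)) (runId + 1)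
    else pvAOuter s ids (pvAInner s (i + 1)) runId
  else ids
termination_by s.length - i
decreasing_by
  · omega
  · have := pvAInner_ge s (i + 1); omega
  · have := pvAInner_ge s (i + 1); omega

def proline_run_ids (seq : String) : List Int :=
  let s := (PySem.Str.upper (PySem.Str.strip seq)).toList
  pvAOuter s (List.replicate s.length (-1)) 0 0

-- ===== PORT B =====
-- phase 1 of B: run-length encoding built left-to-right (Source B mutates the last group in place)
def pvRleStep (groups : List (Char × Nat)) (ch : Char) : List (Char × Nat) :=
  match groups.getLast? with
  | some (c, n) => if c = ch then groups.dropLast ++ [(c, n + 1)] else groups ++ [(ch, 1)]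
  | none => [(ch, 1)]

def pvRle (s : List Char) : List (Char × Nat) := s.foldl pvRleStep []

-- phase 2 of B: label each group
def pvLabel : List (Char × Nat) → Int → List Int
  | [], _ => []
  | (ch, n) :: rest, runId =>
    if ch = 'P' ∧ 2 ≤ n then List.replicate n runId ++ pvLabel rest (runId + 1)
    else List.replicate n (-1) ++ pvLabel rest runId

def proline_run_ids_alt (seq : String) : List Int :=
  let s := (PySem.Str.upper (PySem.Str.strip seq)).toList
  pvLabel (pvRle s) 0

-- ===== PRECONDITION & SPEC =====
def Spec_proline_run_ids (seq : String) (out : List Int) : Prop := out = proline_run_ids_alt seq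
instance (seq : String) (out : List Int) : Decidable (Spec_proline_run_ids seq out) := by unfold Spec_proline_run_ids; infer_instance

-- ===== CLAIM (what is proved, stated in full; the proofs are below) =====
def Claim_equal_proline_run_ids : Prop := ∀ (seq : String), Dom_proline_run_ids seq → Spec_proline_run_ids seq (proline_run_ids seq)

-- ===== LEMMAS AND PROOFS =====

theorem pvRleStep_ne_nil (g : List (Char × Nat)) (ch : Char) : pvRleStep g ch ≠ [] := by
  unfold pvRleStep
  split
  · split <;> simp
  · simp

theorem pvRleStep_append (g gs : List (Char × Nat)) (ch : Char) (h : gs ≠ []) :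
    pvRleStep (g ++ gs) ch = g ++ pvRleStep gs ch := by
  obtain ⟨l₂, ⟨c, n⟩, rfl⟩ := gs.eq_nil_or_concat.resolve_left h
  unfold pvRleStep
  simp only [List.concat_eq_append, ← List.append_assoc, List.getLast?_concat,
    List.dropLast_concat]
  split <;> simp

theorem pvFoldl_rleStep_append (l : List Char) (g gs : List (Char × Nat)) (h : gs ≠ []) :
    l.foldl pvRleStep (g ++ gs) = g ++ l.foldl pvRleStep gs := by
  induction l generalizing gs with
  | nil => simp
  | cons d l ih =>
    simp only [List.foldl_cons]
    rw [pvRleStep_append g gs d h, ih _ (pvRleStep_ne_nil gs d)]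

theorem pvFoldl_rleStep_one (c : Char) (n : Nat) (l : List Char) :
    l.foldl pvRleStep [(c, n)] =
      (c, n + (l.takeWhile (· == c)).length) :: pvRle (l.dropWhile (· == c)) := by
  induction l generalizing n with
  | nil => simp [pvRle]
  | cons d l ih =>
    by_cases hd : d = c
    · subst hd
      have hstep : pvRleStep [(d, n)] d = [(d, n + 1)] := by
        simp [pvRleStep]
      simp only [List.foldl_cons, hstep, ih, List.takeWhile_cons, List.dropWhile_cons,
        beq_self_eq_true, if_pos rfl]
      simp [Nat.add_assoc, Nat.add_comm 1]
    · have hcd : ¬ c = d := fun hcd => hd hcd.symm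
      have hstep : pvRleStep [(c, n)] d = [(c, n)] ++ [(d, 1)] := by
        simp [pvRleStep, hcd]
      have hrle : pvRle (d :: l) = l.foldl pvRleStep [(d, 1)] := by
        simp [pvRle, pvRleStep]
      simp only [List.foldl_cons, hstep,
        pvFoldl_rleStep_append l [(c, n)] [(d, 1)] (by simp)]
      simp [List.takeWhile_cons, List.dropWhile_cons, hd, hrle]

theorem pvRle_cons (c : Char) (l : List Char) :
    pvRle (c :: l) =
      (c, 1 + (l.takeWhile (· == c)).length) :: pvRle (l.dropWhile (· == c)) := by
  have h : pvRle (c :: l) = l.foldl pvRleStep [(c, 1)] := by simp [pvRle, pvRleStep]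
  rw [h, pvFoldl_rleStep_one]

theorem pvDropWhile_eq_drop (p : Char → Bool) (l : List Char) :
    l.dropWhile p = l.drop (l.takeWhile p).length := by
  induction l with
  | nil => simp
  | cons a l ih =>
    by_cases hp : p a <;> simp [List.dropWhile_cons, List.takeWhile_cons, hp, ih]

theorem pvLabel_cons_ne (c : Char) (n : Nat) (gs : List (Char × Nat)) (rid : Int)
    (hc : ¬ c = 'P') :
    pvLabel ((c, n) :: gs) rid = List.replicate n (-1) ++ pvLabel gs rid := by
  simp [pvLabel, hc]

-- B's value on a cons whose head is not 'P' peels one -1, regardless of grouping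
theorem pvLabel_rle_cons_ne (c : Char) (l : List Char) (rid : Int) (hc : ¬ c = 'P') :
    pvLabel (pvRle (c :: l)) rid = -1 :: pvLabel (pvRle l) rid := by
  rw [pvRle_cons, pvLabel_cons_ne _ _ _ _ hc]
  rcases l with _ | ⟨d, l'⟩
  · simp [pvRle, pvLabel]
  · by_cases hd : d = c
    · subst hd
      rw [pvRle_cons, pvLabel_cons_ne _ _ _ _ hc]
      simp only [List.takeWhile_cons, List.dropWhile_cons, beq_self_eq_true, if_true,
        List.length_cons]
      rw [show 1 + ((List.takeWhile (fun x => x == d) l').length + 1)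
            = (1 + (List.takeWhile (fun x => x == d) l').length) + 1 from by omega,
        List.replicate_succ]
      simp
    · simp [List.takeWhile_cons, List.dropWhile_cons, hd]

-- the for-loop `for k in range(i, j): ids[k] = rid` as take/replicate/drop
theorem pvFold_set (rid : Int) (m i : Nat) (ids : List Int) (h : i + m ≤ ids.length) :
    (List.range' i m).foldl (fun a k => a.set k rid) ids =
      ids.take i ++ List.replicate m rid ++ ids.drop (i + m) := by
  induction m generalizing i ids with
  | zero => simp
  | succ m ih =>
    rw [List.range'_1_concat, List.foldl_append, ih i ids (by omega),
      List.foldl_cons, List.foldl_nil]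
    have him : i + m < ids.length := by omega
    have hlt : (ids.take i ++ List.replicate m rid).length = i + m := by simp; omega
    rw [List.set_append, if_neg (by rw [hlt]; omega), hlt,
      Nat.sub_self, ← List.getElem_cons_drop him]
    simp [List.replicate_succ', List.append_assoc, show i + (m + 1) = i + m + 1 from by omega]
    rw [← List.getElem_cons_drop him]
    rfl

theorem pvAInner_eq (s : List Char) (j : Nat) :
    pvAInner s j = j + ((s.drop j).takeWhile (· == 'P')).length := by
  unfold pvAInner
  split
  · rename_i h
    rw [← List.getElem_cons_drop h]
    split
    · rename_i hP
      rw [pvAInner_eq s (j + 1)]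
      simp [List.takeWhile_cons, hP]
      omega
    · rename_i hP
      simp [List.takeWhile_cons, hP]
  · rename_i h
    rw [List.drop_eq_nil_of_le (by omega)]
    simp
termination_by s.length - j

-- the suffix of the ids array from any position ≥ a stays all -1
theorem pvDropRep (ids : List Int) (len a b : Nat)
    (h : ids.drop a = List.replicate (len - a) (-1)) (hab : a ≤ b) :
    ids.drop b = List.replicate (len - b) (-1) := by
  have h2 : ids.drop b = (ids.drop a).drop (b - a) := by
    rw [List.drop_drop]; congr 1; omega
  rw [h2, h, List.drop_replicate]; congr 1; omega

-- main invariant: A's loop from position i equals the untouched prefix plus B's labeling of the rest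
theorem pvMain (s : List Char) (ids : List Int) (i : Nat) (rid : Int)
    (hlen : ids.length = s.length)
    (hdrop : ids.drop i = List.replicate (s.length - i) (-1)) :
    pvAOuter s ids i rid = ids.take i ++ pvLabel (pvRle (s.drop i)) rid := by
  unfold pvAOuter
  split
  · rename_i h
    have hids_i? : ids[i]? = some (-1) := by
      have h1 := congrArg (fun l => l[0]?) hdrop
      simpa [List.getElem?_drop, List.getElem?_replicate,
        show 0 < s.length - i by omega] using h1
    have htake : ids.take (i + 1) = ids.take i ++ [-1] := by
      rw [List.take_succ, hids_i?]
      rfl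
    rw [← List.getElem_cons_drop h]
    split
    · rename_i hP
      rw [pvMain s ids (i + 1) rid hlen (pvDropRep ids s.length i (i + 1) hdrop (by omega))]
      rw [pvLabel_rle_cons_ne _ _ _ hP, htake]
      simp
    · rename_i hP
      push_neg at hP
      have hj := pvAInner_eq s (i + 1)
      set t := ((s.drop (i + 1)).takeWhile (· == 'P')).length with ht
      have htle : t ≤ s.length - (i + 1) := by
        have h1 : ((s.drop (i + 1)).takeWhile (· == 'P')).length ≤ (s.drop (i + 1)).length :=
          (List.takeWhile_sublist _).length_le
        simp only [List.length_drop] at h1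
        omega
      have hdw : (s.drop (i + 1)).dropWhile (· == 'P') = s.drop (i + 1 + t) := by
        rw [pvDropWhile_eq_drop, ← ht, List.drop_drop]
      rw [pvRle_cons]
      simp only [hP]
      rw [← ht, hdw]
      rcases Nat.eq_zero_or_pos t with ht0 | htpos
      · -- isolated P: no write, group has size 1
        rw [if_neg (by omega : ¬ pvAInner s (i + 1) - i ≥ 2)]
        rw [pvMain s ids (pvAInner s (i + 1)) rid hlen
          (pvDropRep ids s.length i (pvAInner s (i + 1)) hdrop (by omega))]
        rw [hj, ht0]
        simp [pvLabel, htake]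
      · -- real run of length 1 + t ≥ 2
        rw [if_pos (by omega : pvAInner s (i + 1) - i ≥ 2)]
        have hm : pvAInner s (i + 1) - i = 1 + t := by omega
        rw [hm, pvFold_set rid (1 + t) i ids (by omega)]
        have hidx : i + (1 + t) = i + 1 + t := by omega
        rw [hidx]
        have hsplit : ids.take i ++ List.replicate (1 + t) rid ++ ids.drop (i + 1 + t)
            = (ids.take i ++ List.replicate (1 + t) rid) ++ ids.drop (i + 1 + t) := by
          simp [List.append_assoc]
        have hl1 : (ids.take i ++ List.replicate (1 + t) rid).length = i + 1 + t := by
          simp; omega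
        have hlen' : (ids.take i ++ List.replicate (1 + t) rid ++ ids.drop (i + 1 + t)).length
            = s.length := by
          simp; omega
        rw [pvMain s _ (pvAInner s (i + 1)) (rid + 1) hlen'
          (by
            rw [hj, hsplit, List.drop_left' hl1]
            exact pvDropRep ids s.length i (i + 1 + t) hdrop (by omega))]
        rw [hj, hsplit, List.take_left' hl1]
        have hlab : pvLabel (('P', 1 + t) :: pvRle (s.drop (i + 1 + t))) rid
            = List.replicate (1 + t) rid ++ pvLabel (pvRle (s.drop (i + 1 + t))) (rid + 1) := by
          simp [pvLabel, show (2 : Nat) ≤ 1 + t by omega]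
        rw [hlab]
        simp [List.append_assoc]
  · rename_i h
    rw [List.drop_eq_nil_of_le (by omega)]
    simp [pvRle, pvLabel, List.take_of_length_le (show ids.length ≤ i from by omega)]
termination_by s.length - i
decreasing_by
  · omega
  · have := pvAInner_ge s (i + 1); omega
  · have := pvAInner_ge s (i + 1); omega

-- ===== VERDICT (by name: the statement is the Claim_ definition above) =====
theorem proline_run_ids_spec : Claim_equal_proline_run_ids := by
  intro seq _
  unfold Spec_proline_run_ids proline_run_ids proline_run_ids_alt
  rw [pvMain _ _ 0 0 (by simp) (by simp)]
  simp
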